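-- pv_equiv track=rewrite | github.com/LukhasAI/Lukhas | fstring_fix.py | missing_closing_braces_count
-- ===== SOURCE A (Python) =====
-- def missing_closing_braces_count(s: str) -> int:
--     """Count how many closing braces are needed to balance top-level f-string fields."""
--     depth = 0
--     i = 0
--     n = len(s)
--     for i in range(n):
--         c = s[i]
--         if c == '{':
--             if i + 1 < n and s[i+1] == '{':
--                 i += 1
--                 continue
--             depth += 1
--         elif c == '}':
--             if i + 1 < n and s[i+1] == '}':
--                 i += 1
--                 continue
--             if depth > 0:
--                 depth -= 1
--             else:
--                 # Stray closing brace; we won't "fix" this automatically.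
--                 pass
--     return depth
-- ===== SOURCE B (Python) =====
-- def missing_closing_braces_count(s: str) -> int:
--     """Count how many closing braces are needed to balance top-level f-string fields."""
--     events = [c for c, nxt in zip(s, s[1:] + ' ')
--               if (c == '{' and nxt != '{') or (c == '}' and nxt != '}')]
--     stack = []
--     for e in events:
--         if e == '}' and stack and stack[-1] == '{':
--             stack.pop()
--         else:
--             stack.append(e)
--     return stack.count('{')
-- ===== Notes on version B (the rewrite author's own statement) =====
-- stated objective: alternative
-- what changed: Replaces A's single clamped depth counter by a staged pipeline: first extract the brace-event list (collapsing doubled braces via a successor zip), then reduce it with an explicit stack that cancels matched open/close pairs, and finally count the opening-brace tokens left on the stack.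
import Mathlib
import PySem

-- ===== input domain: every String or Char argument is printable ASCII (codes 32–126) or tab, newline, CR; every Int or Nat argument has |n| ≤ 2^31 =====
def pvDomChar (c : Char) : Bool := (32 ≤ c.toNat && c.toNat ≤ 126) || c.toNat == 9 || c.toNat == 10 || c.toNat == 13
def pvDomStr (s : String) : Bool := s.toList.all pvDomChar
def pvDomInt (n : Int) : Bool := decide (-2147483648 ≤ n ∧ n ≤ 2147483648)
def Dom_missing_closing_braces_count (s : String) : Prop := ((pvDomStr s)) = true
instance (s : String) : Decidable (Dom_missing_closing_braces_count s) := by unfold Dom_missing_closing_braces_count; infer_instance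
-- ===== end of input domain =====

-- B replaces A's clamped depth counter by a staged pipeline: extract the brace-event list
-- (collapsing doubled braces via a successor zip), cancel matched pairs with an explicit
-- stack, and count the '{' tokens left on the stack (objective: alternative).

-- ===== PORT A =====
-- A: loop i in range(n), look at s[i] and s[i+1]; depth clamped at 0 on '}'.
def missing_closing_braces_count (s : String) : Int :=
  let cs := s.toList
  let n : Int := cs.length
  (PySem.List.pyRange 0 n 1).foldl (fun depth i =>
    let c := (PySem.List.pyGet? cs i).getD ' '
    if c = '{' then
      if i + 1 < n ∧ (PySem.List.pyGet? cs (i + 1)).getD ' ' = '{' then depth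
      else depth + 1
    else if c = '}' then
      if i + 1 < n ∧ (PySem.List.pyGet? cs (i + 1)).getD ' ' = '}' then depth
      else if depth > 0 then depth - 1 else depth
    else depth) 0

-- ===== PORT B =====
-- B: event list by zipping each char with its successor (space sentinel), then an explicit
-- stack cancelling matched pairs (head = Python stack top), then count '{' on the stack.
def missing_closing_braces_count_alt (s : String) : Int :=
  let cs := s.toList
  let events := (cs.zip (cs.drop 1 ++ [' '])).filterMap (fun cn =>
    if (cn.1 = '{' ∧ cn.2 ≠ '{') ∨ (cn.1 = '}' ∧ cn.2 ≠ '}') then some cn.1 else none)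
  let stack := events.foldl (fun (st : List Char) e =>
    if e = '}' ∧ st.headD ' ' = '{' then st.tail else e :: st) []
  (PySem.List.count stack '{' : Int)

-- ===== PRECONDITION & SPEC =====
def Spec_missing_closing_braces_count (s : String) (out : Int) : Prop := out = missing_closing_braces_count_alt s
instance (s : String) (out : Int) : Decidable (Spec_missing_closing_braces_count s out) := by unfold Spec_missing_closing_braces_count; infer_instance

-- ===== CLAIM (what is proved, stated in full; the proofs are below) =====
def Claim_equal_missing_closing_braces_count : Prop := ∀ (s : String), Dom_missing_closing_braces_count s → Spec_missing_closing_braces_count s (missing_closing_braces_count s)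

-- ===== LEMMAS AND PROOFS =====

-- structural reference run: A's clamped loop expressed as recursion over the char list
def pvRunA : List Char → Int → Int
  | [], d => d
  | c :: rest, d =>
    let nxt := rest.headD ' '
    if c = '{' then
      (if nxt = '{' then pvRunA rest d else pvRunA rest (d + 1))
    else if c = '}' then
      (if nxt = '}' then pvRunA rest d
       else if d > 0 then pvRunA rest (d - 1) else pvRunA rest d)
    else pvRunA rest d

-- A's indexed fold, started at any valid index k, equals the structural run on the suffix
theorem pvA_fold_eq_runA (cs : List Char) (k : Nat) (d : Int) (hk : k ≤ cs.length) :
    (PySem.List.pyRange (k : Int) (cs.length : Int) 1).foldl (fun depth i =>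
      let c := (PySem.List.pyGet? cs i).getD ' '
      if c = '{' then
        if i + 1 < (cs.length : Int) ∧ (PySem.List.pyGet? cs (i + 1)).getD ' ' = '{' then depth
        else depth + 1
      else if c = '}' then
        if i + 1 < (cs.length : Int) ∧ (PySem.List.pyGet? cs (i + 1)).getD ' ' = '}' then depth
        else if depth > 0 then depth - 1 else depth
      else depth) d = pvRunA (cs.drop k) d := by
  induction hn : cs.length - k generalizing k d with
  | zero =>
    have hk' : k = cs.length := by omega
    subst hk'
    rw [PySem.List.pyRange_one_eq_nil (by exact le_refl _)]
    simp [List.foldl, List.drop_length, pvRunA]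
  | succ m ih =>
    have hklt : k < cs.length := by omega
    rw [PySem.List.pyRange_one_cons (by exact_mod_cast hklt)]
    rw [List.foldl_cons]
    have hdrop : cs.drop k = cs[k] :: cs.drop (k + 1) := List.drop_eq_getElem_cons hklt
    have hget : PySem.List.pyGet? cs (k : Int) = some cs[k] := by
      simp [List.getElem?_eq_getElem hklt]
    have hcast : (k : Int) + 1 = ((k + 1 : Nat) : Int) := by push_cast; ring
    have hget1 : (PySem.List.pyGet? cs ((k : Int) + 1)).getD ' ' = (cs.drop (k + 1)).headD ' ' := by
      by_cases h1 : k + 1 < cs.length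
      · have h2 : (k : Int) + 1 < (cs.length : Int) := by exact_mod_cast h1
        rw [List.drop_eq_getElem_cons h1,
          PySem.List.pyGet?_of_nonneg cs (by omega : (0:Int) ≤ (k : Int) + 1)]
        simp [show ((k : Int) + 1).toNat = k + 1 by omega, List.getElem?_eq_getElem h1]
      · rw [List.drop_eq_nil_of_le (by omega),
          PySem.List.pyGet?_of_nonneg cs (by omega : (0:Int) ≤ (k : Int) + 1)]
        simp [show ((k : Int) + 1).toNat = k + 1 by omega,
          List.getElem?_eq_none (show cs.length ≤ k + 1 by omega)]
    have hlt1 : ((k : Int) + 1 < (cs.length : Int)) ↔ k + 1 < cs.length := by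
      constructor <;> intro h <;> exact_mod_cast h
    have ihk := fun d => ih (k + 1) d (by omega) (by omega)
    rw [hdrop]
    simp only [hget, Option.getD_some, pvRunA]
    by_cases hc : cs[k] = '{'
    · simp only [if_pos hc]
      by_cases hnx : (cs.drop (k + 1)).headD ' ' = '{'
      · have hne : k + 1 < cs.length := by
          by_contra hcon
          rw [List.drop_eq_nil_of_le (by omega)] at hnx; simp at hnx
        rw [if_pos ⟨hlt1.mpr hne, by rw [hget1]; exact hnx⟩, if_pos hnx, hcast, ihk]
      · rw [if_neg (by rintro ⟨_, h2⟩; rw [hget1] at h2; exact hnx h2), if_neg hnx, hcast, ihk]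
    · by_cases hc2 : cs[k] = '}'
      · simp only [if_neg hc, if_pos hc2]
        by_cases hnx : (cs.drop (k + 1)).headD ' ' = '}'
        · have hne : k + 1 < cs.length := by
            by_contra hcon
            rw [List.drop_eq_nil_of_le (by omega)] at hnx; simp at hnx
          rw [if_pos ⟨hlt1.mpr hne, by rw [hget1]; exact hnx⟩, if_pos hnx, hcast, ihk]
        · rw [if_neg (by rintro ⟨_, h2⟩; rw [hget1] at h2; exact hnx h2), if_neg hnx]
          by_cases hd : d > 0
          · rw [if_pos hd, if_pos hd, hcast, ihk]
          · rw [if_neg hd, if_neg hd, hcast, ihk]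
      · simp only [if_neg hc, if_neg hc2]
        rw [hcast, ihk]

-- the successor-zip list recurses like the char list itself
theorem pvPairs_cons (c : Char) (rest : List Char) :
    (c :: rest).zip ((c :: rest).drop 1 ++ [' ']) =
      (c, rest.headD ' ') :: rest.zip (rest.drop 1 ++ [' ']) := by
  cases rest with
  | nil => simp
  | cons r rs => simp [List.zip]

-- B's event list, as a definition for the induction
def pvEvents (cs : List Char) : List Char :=
  (cs.zip (cs.drop 1 ++ [' '])).filterMap (fun cn =>
    if (cn.1 = '{' ∧ cn.2 ≠ '{') ∨ (cn.1 = '}' ∧ cn.2 ≠ '}') then some cn.1 else none)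

def pvStep : List Char → Char → List Char :=
  fun st e => if e = '}' ∧ st.headD ' ' = '{' then st.tail else e :: st

-- B's stack fold from the canonical shape 'd opens over k strays' computes A's clamped run
theorem pvB_stack_eq_runA (cs : List Char) (d k : Nat) :
    (((pvEvents cs).foldl pvStep
        (List.replicate d '{' ++ List.replicate k '}')).count '{' : Int) = pvRunA cs (d : Int) := by
  induction cs generalizing d k with
  | nil =>
    simp [pvEvents, pvRunA, List.count_append, List.count_replicate]
  | cons c rest ih =>
    have hev : pvEvents (c :: rest) =
        (if (c = '{' ∧ rest.headD ' ' ≠ '{') ∨ (c = '}' ∧ rest.headD ' ' ≠ '}') then [c] else []) ++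
          pvEvents rest := by
      unfold pvEvents
      rw [pvPairs_cons, List.filterMap_cons]
      split_ifs with h <;> simp
    rw [hev, List.foldl_append]
    simp only [pvRunA]
    by_cases hc : c = '{'
    · subst hc
      by_cases hnx : rest.headD ' ' = '{'
      · rw [if_neg (by rintro (⟨_, h⟩ | ⟨h, _⟩); exacts [h hnx, by simp at h]),
          if_pos rfl, if_pos hnx]
        simpa using ih d k
      · rw [if_pos (Or.inl ⟨rfl, hnx⟩), if_pos rfl, if_neg hnx]
        simp only [List.foldl_cons, List.foldl_nil]
        have hstep : pvStep (List.replicate d '{' ++ List.replicate k '}') '{' =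
            List.replicate (d + 1) '{' ++ List.replicate k '}' := by
          simp [pvStep, List.replicate_succ]
        rw [hstep, ih (d + 1) k]
        congr 1
    · by_cases hc2 : c = '}'
      · subst hc2
        by_cases hnx : rest.headD ' ' = '}'
        · rw [if_neg (by rintro (⟨h, _⟩ | ⟨_, h⟩); exacts [by simp at h, h hnx]),
            if_neg (by decide), if_pos rfl, if_pos hnx]
          simpa using ih d k
        · rw [if_pos (Or.inr ⟨rfl, hnx⟩), if_neg (by decide), if_pos rfl, if_neg hnx]
          simp only [List.foldl_cons, List.foldl_nil]
          cases d with
          | zero =>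
            have hstep : pvStep (List.replicate 0 '{' ++ List.replicate k '}') '}' =
                List.replicate 0 '{' ++ List.replicate (k + 1) '}' := by
              cases k <;> simp [pvStep, List.replicate_succ]
            rw [hstep, if_neg (by norm_num), ih 0 (k + 1)]
          | succ d' =>
            have hstep : pvStep (List.replicate (d' + 1) '{' ++ List.replicate k '}') '}' =
                List.replicate d' '{' ++ List.replicate k '}' := by
              simp [pvStep, List.replicate_succ]
            rw [hstep, if_pos (by push_cast; omega), ih d' k]
            congr 1
            push_cast; ring
      · rw [if_neg (by rintro (⟨h, _⟩ | ⟨h, _⟩) <;> [exact hc h; exact hc2 h]),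
          if_neg hc, if_neg hc2]
        simpa using ih d k

-- ===== VERDICT (by name: the statement is the Claim_ definition above) =====
theorem missing_closing_braces_count_spec : Claim_equal_missing_closing_braces_count := by
  intro s _
  unfold Spec_missing_closing_braces_count
  have hA := pvA_fold_eq_runA s.toList 0 0 (Nat.zero_le _)
  simp only [Nat.cast_zero, List.drop_zero] at hA
  have hB2 : missing_closing_braces_count_alt s =
      (((pvEvents s.toList).foldl pvStep []).count '{' : Int) := by
    simp only [missing_closing_braces_count_alt, pvEvents, PySem.List.count_eq]
    rfl
  have hB := pvB_stack_eq_runA s.toList 0 0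
  simp only [List.replicate_zero, List.append_nil, Nat.cast_zero] at hB
  unfold missing_closing_braces_count
  rw [hA, hB2, hB]
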